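-- pv_equiv track=rewrite | github.com/cutehammond772/problem-solving-archive | 백준/Gold/3099. 도트 매트릭스 프린터/도트 매트릭스 프린터.py | solve
-- ===== SOURCE A (Python) =====
-- INF = 20001
--
-- def solve(S):
-- 	L = len(S)
--
-- 	# 특정 위치의 문자에 대해 SET, 그 이후를 NEXT로 처리했을 때..
-- 	memo = [INF] * L
--
-- 	# 처음에는 SET 후 WRITE하는 방법밖에 없다.
-- 	memo[0] = 2
--
-- 	for x in range(1, L):
-- 		for y in range(x):
-- 			next_cost = 2 * (x - y - 1)
--
-- 			if S[x] == S[y]: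
-- 				memo[x] = min(memo[x], memo[y] + next_cost + 1)
-- 			else:
-- 				memo[x] = min(memo[x], memo[y] + next_cost + 2)
--
-- 	return memo[L - 1]
-- ===== SOURCE B (Python) =====
-- INF = 20001
--
-- def solve(S):
--     L = len(S)
--     # running minima over processed positions y of d_y = memo[y] - 2*y:
--     # best  = min over all y, bestc[c] = min over y with S[y] == c.
--     cur = 2
--     best = 2                      # d_0 = memo[0] - 0 = 2
--     bestc = {S[0]: 2}
--     for x in range(1, L):
--         c = S[x]
--         m = best + 2
--         if c in bestc:
--             m = min(m, bestc[c] + 1)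
--         cur = min(m + 2 * x - 2, INF)
--         d = cur - 2 * x
--         if d < best:
--             best = d
--         if c not in bestc or d < bestc[c]:
--             bestc[c] = d
--     return cur
-- ===== Notes on version B (the rewrite author's own statement) =====
-- stated objective: faster
-- what changed: Replaces A's O(L^2) nested scan over all previous positions by a single pass that maintains a running global minimum and a per-character (dict) minimum of memo[y]-2y, so each position is processed in O(1).
import Mathlib
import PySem

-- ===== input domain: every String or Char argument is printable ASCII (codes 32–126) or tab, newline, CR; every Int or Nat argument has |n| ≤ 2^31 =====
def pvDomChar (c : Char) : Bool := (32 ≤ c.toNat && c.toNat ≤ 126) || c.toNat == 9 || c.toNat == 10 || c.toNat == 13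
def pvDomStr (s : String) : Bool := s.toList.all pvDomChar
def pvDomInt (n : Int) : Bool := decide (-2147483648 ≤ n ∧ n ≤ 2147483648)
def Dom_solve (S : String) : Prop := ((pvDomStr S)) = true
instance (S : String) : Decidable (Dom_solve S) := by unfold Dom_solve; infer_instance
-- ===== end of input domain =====

-- B replaces A's quadratic inner scan by running minima (global and per-character) of memo[y]-2y;
-- equivalence of the RETURN value is proved for every non-empty string (both raise IndexError on "").

-- ===== PORT A =====
-- inner loop 'for y in range(x)' of A, updating memo[x] in place
def solveInnerA (cs : List Char) (x : Nat) (memo : List Int) : List Int :=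
  (List.range x).foldl (fun (memo : List Int) (y : Nat) =>
    let next_cost : Int := 2 * ((x : Int) - (y : Int) - 1)
    if cs.getD x ' ' = cs.getD y ' ' then
      memo.set x (min (memo.getD x 0) (memo.getD y 0 + next_cost + 1))
    else
      memo.set x (min (memo.getD x 0) (memo.getD y 0 + next_cost + 2))) memo

def solve (S : String) : Int :=
  let cs := S.toList
  let L := cs.length
  let memo := List.replicate L (20001 : Int)
  let memo := memo.set 0 2                -- memo[0] = 2 (IndexError on "", excluded by Pre_)
  let memo := (List.range' 1 (L - 1)).foldl (fun memo x => solveInnerA cs x memo) memo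
  memo.getD (L - 1) 0                     -- memo[L-1]

-- ===== PORT B =====
-- one step of B's loop; state = (cur, best, bestc)
def solveStepB (cs : List Char) (st : Int × Int × PySem.Dict Char Int) (x : Nat) :
    Int × Int × PySem.Dict Char Int :=
  let c := cs.getD x ' '
  let best := st.2.1
  let bestc := st.2.2
  let m := best + 2
  let m := match bestc.get? c with        -- if c in bestc: m = min(m, bestc[c] + 1)
    | some v => min m (v + 1)
    | none => m
  let cur := min (m + 2 * (x : Int) - 2) 20001
  let d := cur - 2 * (x : Int)
  let best := if d < best then d else best
  let bestc := match bestc.get? c with    -- if c not in bestc or d < bestc[c]: bestc[c] = d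
    | none => bestc.insert c d
    | some v => if d < v then bestc.insert c d else bestc
  (cur, best, bestc)

def solve_alt (S : String) : Int :=
  let cs := S.toList
  let L := cs.length
  -- cur = 2, best = 2, bestc = {S[0]: 2}  (S[0] raises IndexError on "", excluded by Pre_)
  let init : Int × Int × PySem.Dict Char Int :=
    (2, 2, PySem.Dict.insert PySem.Dict.empty (cs.getD 0 ' ') 2)
  ((List.range' 1 (L - 1)).foldl (solveStepB cs) init).1

-- ===== PRECONDITION & SPEC =====
-- Pre_ excludes exactly the empty string, on which A raises IndexError (memo[0] = 2 on an empty list).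
def Pre_solve (S : String) : Prop := S.toList ≠ []
instance (S : String) : Decidable (Pre_solve S) := by unfold Pre_solve; infer_instance

def pvWitness_solve : String := "abcab"

def Spec_solve (S : String) (out : Int) : Prop := out = solve_alt S
instance (S : String) (out : Int) : Decidable (Spec_solve S out) := by unfold Spec_solve; infer_instance

-- ===== CLAIM (what is proved, stated in full; the proofs are below) =====
def Claim_equal_solve : Prop := ∀ (S : String), Dom_solve S → Pre_solve S → Spec_solve S (solve S)

-- ===== LEMMAS AND PROOFS =====

-- reference DP table: build cs n = A's final memo values for positions 0..n
def stepv (cs : List Char) (acc : List Int) (x : Nat) : Int :=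
  (List.range x).foldl (fun (m : Int) (y : Nat) =>
    min m (acc.getD y 0 + 2 * ((x : Int) - (y : Int) - 1) +
      (if cs.getD x ' ' = cs.getD y ' ' then 1 else 2))) 20001

def build (cs : List Char) : Nat → List Int
  | 0 => [2]
  | n + 1 => build cs n ++ [stepv cs (build cs n) (n + 1)]

def fv (cs : List Char) (n : Nat) : Int := (build cs n).getD n 0
def dv (cs : List Char) (n : Nat) : Int := fv cs n - 2 * (n : Int)

-- B's running minima, in the exact update shape of B's loop
def bmin (cs : List Char) : Nat → Int
  | 0 => 2
  | n + 1 => if dv cs (n + 1) < bmin cs n then dv cs (n + 1) else bmin cs n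

def cmin (cs : List Char) (c : Char) : Nat → Option Int
  | 0 => if cs.getD 0 ' ' = c then some 2 else none
  | n + 1 =>
    if cs.getD (n + 1) ' ' = c then
      match cmin cs c n with
      | none => some (dv cs (n + 1))
      | some v => some (if dv cs (n + 1) < v then dv cs (n + 1) else v)
    else cmin cs c n

def Ev (cs : List Char) (c : Char) (n : Nat) : Int :=
  match cmin cs c n with
  | none => bmin cs n + 2
  | some v => min (bmin cs n + 2) (v + 1)

theorem length_build (cs : List Char) (n : Nat) : (build cs n).length = n + 1 := by
  induction n with
  | zero => rfl
  | succ n ih => simp [build, ih]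

theorem build_getD_stable (cs : List Char) {m n : Nat} (h : m ≤ n) :
    (build cs n).getD m 0 = fv cs m := by
  induction n with
  | zero => interval_cases m; rfl
  | succ n ih =>
    rcases Nat.lt_or_ge m (n + 1) with hm | hm
    · rw [build, List.getD_append _ _ 0 m (by rw [length_build]; omega)]
      exact ih (by omega)
    · have : m = n + 1 := by omega
      subst this
      rfl

theorem bmin_le_cmin (cs : List Char) (c : Char) (n : Nat) {v : Int}
    (h : cmin cs c n = some v) : bmin cs n ≤ v := by
  induction n generalizing v with
  | zero =>
    simp only [cmin] at h
    split at h
    · injection h with h; simp only [bmin]; omega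
    · exact absurd h (by simp)
  | succ n ih =>
    have hb : bmin cs (n + 1) = if dv cs (n + 1) < bmin cs n then dv cs (n + 1) else bmin cs n :=
      rfl
    simp only [cmin] at h
    split at h
    · cases hcm : cmin cs c n with
      | none => rw [hcm] at h; injection h with h; rw [hb]; split <;> omega
      | some w =>
        rw [hcm] at h; injection h with h
        have := ih hcm
        rw [hb]; subst h; split <;> split <;> omega
    · have := ih h
      rw [hb]; split <;> omega

theorem Ev_succ (cs : List Char) (c : Char) (n : Nat) :
    Ev cs c (n + 1) = min (Ev cs c n)
      (dv cs (n + 1) + (if cs.getD (n + 1) ' ' = c then 1 else 2)) := by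
  have hb : bmin cs (n + 1) = if dv cs (n + 1) < bmin cs n then dv cs (n + 1) else bmin cs n :=
    rfl
  have hcm1 : cmin cs c (n + 1) =
      if cs.getD (n + 1) ' ' = c then
        (match cmin cs c n with
          | none => some (dv cs (n + 1))
          | some v => some (if dv cs (n + 1) < v then dv cs (n + 1) else v))
      else cmin cs c n := rfl
  by_cases hc : cs.getD (n + 1) ' ' = c
  · rw [if_pos hc] at hcm1
    rw [show (if cs.getD (n + 1) ' ' = c then (1 : Int) else 2) = 1 from if_pos hc]
    cases hcm : cmin cs c n with
    | none =>
      rw [hcm] at hcm1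
      simp only [Ev, hcm1, hcm, hb]
      split <;> omega
    | some w =>
      have hw := bmin_le_cmin cs c n hcm
      rw [hcm] at hcm1
      simp only [Ev, hcm1, hcm, hb]
      split <;> split <;> omega
  · rw [if_neg hc] at hcm1
    rw [show (if cs.getD (n + 1) ' ' = c then (1 : Int) else 2) = 2 from if_neg hc]
    cases hcm : cmin cs c n with
    | none =>
      simp only [Ev, hcm1, hcm, hb]
      split <;> omega
    | some w =>
      have hw := bmin_le_cmin cs c n hcm
      simp only [Ev, hcm1, hcm, hb]
      split <;> omega

theorem dv_zero (cs : List Char) : dv cs 0 = 2 := by simp [dv, fv, build]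

theorem foldE (cs : List Char) (c : Char) (C : Int) (n : Nat) : ∀ (A : Int),
    (List.range (n + 1)).foldl
      (fun (m : Int) (y : Nat) => min m (dv cs y + (if cs.getD y ' ' = c then 1 else 2) + C)) A
      = min A (Ev cs c n + C) := by
  induction n with
  | zero =>
    intro A
    have h0 := dv_zero cs
    rw [show List.range (0 + 1) = [0] from rfl, List.foldl_cons, List.foldl_nil]
    by_cases hc : cs.getD 0 ' ' = c
    · simp only [Ev, cmin, bmin, if_pos hc]; omega
    · simp only [Ev, cmin, bmin, if_neg hc]; omega
  | succ n ih =>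
    intro A
    rw [List.range_succ, List.foldl_append, ih, List.foldl_cons, List.foldl_nil, Ev_succ]
    split <;> omega

theorem fv_succ (cs : List Char) (n : Nat) :
    fv cs (n + 1) = min 20001 (Ev cs (cs.getD (n + 1) ' ') n + (2 * ((n : Int) + 1) - 2)) := by
  have hfv : fv cs (n + 1) = stepv cs (build cs n) (n + 1) := by
    show (build cs (n + 1)).getD (n + 1) 0 = _
    rw [build]
    have hl := length_build cs n
    rw [show n + 1 = (build cs n).length from hl.symm]
    simp [List.getD_eq_getElem?_getD]
  have hcong :
      (List.range (n + 1)).foldl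
        (fun (m : Int) (y : Nat) =>
          min m ((build cs n).getD y 0 + 2 * (((n + 1 : Nat) : Int) - (y : Int) - 1) +
            (if cs.getD (n + 1) ' ' = cs.getD y ' ' then 1 else 2))) 20001
      = (List.range (n + 1)).foldl
        (fun (m : Int) (y : Nat) =>
          min m (dv cs y + (if cs.getD y ' ' = cs.getD (n + 1) ' ' then 1 else 2) +
            (2 * ((n : Int) + 1) - 2))) 20001 := by
    apply PySem.List.foldl_congr_mem
    intro acc y hy
    have hy' : y ≤ n := by simpa [Nat.lt_succ_iff] using List.mem_range.mp hy
    rw [build_getD_stable cs hy']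
    have hd : fv cs y = dv cs y + 2 * (y : Int) := by simp [dv]
    congr 1
    by_cases hc : cs.getD (n + 1) ' ' = cs.getD y ' '
    · rw [if_pos hc, if_pos hc.symm, hd]; push_cast; ring
    · rw [if_neg hc, if_neg (fun h => hc h.symm), hd]; push_cast; ring
  rw [hfv, stepv, hcong, foldE]

-- A-side: a loop of 'memo[x] = min(memo[x], …)' updates is one set of the folded minimum
theorem foldl_set_min (x : Nat) (g : Int → Nat → Int) :
    ∀ (ys : List Nat) (memo : List Int), (∀ y ∈ ys, y < x) → x < memo.length →
    ys.foldl (fun memo y => memo.set x (min (memo.getD x 0) (g (memo.getD y 0) y))) memo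
      = memo.set x (ys.foldl (fun m y => min m (g (memo.getD y 0) y)) (memo.getD x 0)) := by
  intro ys
  induction ys with
  | nil =>
    intro memo _ hx
    rw [List.foldl_nil, List.foldl_nil, List.getD_eq_getElem memo 0 hx,
      List.set_getElem_self hx]
  | cons y t ih =>
    intro memo hys hx
    rw [List.foldl_cons]
    have hyx : y < x := hys y (List.mem_cons_self)
    have hx' : x < (memo.set x (min (memo.getD x 0) (g (memo.getD y 0) y))).length := by
      simpa using hx
    rw [ih _ (fun z hz => hys z (List.mem_cons_of_mem y hz)) hx']
    have hgetx : (memo.set x (min (memo.getD x 0) (g (memo.getD y 0) y))).getD x 0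
        = min (memo.getD x 0) (g (memo.getD y 0) y) := by
      simp [List.getD_eq_getElem?_getD, hx]
    have hgety : ∀ z ∈ t, (memo.set x (min (memo.getD x 0) (g (memo.getD y 0) y))).getD z 0
        = memo.getD z 0 := by
      intro z hz
      have : x ≠ z := by have := hys z (List.mem_cons_of_mem y hz); omega
      simp [List.getD_eq_getElem?_getD, List.getElem?_set_ne this]
    rw [PySem.List.foldl_congr_mem _ _
      (fun (m : Int) (z : Nat) => min m (g (memo.getD z 0) z)) _
      (fun acc z hz => by rw [hgety z hz]), hgetx, List.set_set, List.foldl_cons]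

theorem innerA_eq (cs : List Char) (x : Nat) (hx : 1 ≤ x) (k : Nat) (hk : 1 ≤ k) :
    solveInnerA cs x (build cs (x - 1) ++ List.replicate k (20001 : Int))
      = build cs x ++ List.replicate (k - 1) (20001 : Int) := by
  obtain ⟨n, rfl⟩ : ∃ n, x = n + 1 := ⟨x - 1, by omega⟩
  obtain ⟨k', rfl⟩ : ∃ k', k = k' + 1 := ⟨k - 1, by omega⟩
  simp only [Nat.succ_sub_one]
  set acc := build cs n with hacc
  have hlen : acc.length = n + 1 := length_build cs n
  set memo := acc ++ List.replicate (k' + 1) (20001 : Int) with hmemo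
  have hxlen : n + 1 < memo.length := by simp [hmemo, hlen]
  -- the two branches of A's inner loop are one set of a min with an if inside
  have hfun : (fun (memo : List Int) (y : Nat) =>
      let next_cost : Int := 2 * (((n + 1 : Nat) : Int) - (y : Int) - 1)
      if cs.getD (n + 1) ' ' = cs.getD y ' ' then
        memo.set (n + 1) (min (memo.getD (n + 1) 0) (memo.getD y 0 + next_cost + 1))
      else
        memo.set (n + 1) (min (memo.getD (n + 1) 0) (memo.getD y 0 + next_cost + 2)))
      = fun (memo : List Int) (y : Nat) =>
        memo.set (n + 1) (min (memo.getD (n + 1) 0)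
          ((fun (v : Int) (y : Nat) => v + 2 * (((n + 1 : Nat) : Int) - (y : Int) - 1) +
            (if cs.getD (n + 1) ' ' = cs.getD y ' ' then 1 else 2)) (memo.getD y 0) y)) := by
    funext memo y
    dsimp only
    split
    next h => rfl
    next h => rfl
  rw [solveInnerA, hfun, foldl_set_min (n + 1)
    (fun (v : Int) (y : Nat) => v + 2 * (((n + 1 : Nat) : Int) - (y : Int) - 1) +
      (if cs.getD (n + 1) ' ' = cs.getD y ' ' then 1 else 2))
    (List.range (n + 1)) memo (fun y hy => List.mem_range.mp hy) hxlen]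
  have hgetx : memo.getD (n + 1) 0 = 20001 := by
    rw [hmemo, ← hlen]
    simp [List.getD_eq_getElem?_getD]
  have hgety : ∀ y ∈ List.range (n + 1), memo.getD y 0 = acc.getD y 0 := by
    intro y hy
    exact List.getD_append _ _ 0 y (by rw [hlen]; exact List.mem_range.mp hy)
  have hbody : (List.range (n + 1)).foldl
      (fun (m : Int) (y : Nat) => min m (memo.getD y 0 + 2 * (((n + 1 : Nat) : Int) - (y : Int) - 1)
        + (if cs.getD (n + 1) ' ' = cs.getD y ' ' then 1 else 2))) (memo.getD (n + 1) 0)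
      = stepv cs acc (n + 1) := by
    rw [hgetx, stepv]
    exact PySem.List.foldl_congr_mem _ _ _ _ (fun m y hy => by rw [hgety y hy])
  rw [hbody, hmemo, show List.replicate (k' + 1) (20001 : Int) = 20001 :: List.replicate k' 20001
    from rfl, ← hlen, List.set_append_right _ _ (Nat.le_refl acc.length)]
  simp only [Nat.sub_self, List.set_cons_zero]
  rw [hlen]
  rw [show build cs (n + 1) = build cs n ++ [stepv cs (build cs n) (n + 1)] from rfl]
  simp [hacc]

theorem lemA (cs : List Char) (n : Nat) (h : n + 1 ≤ cs.length) :
    (List.range' 1 n).foldl (fun memo x => solveInnerA cs x memo)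
        ((List.replicate cs.length (20001 : Int)).set 0 2)
      = build cs n ++ List.replicate (cs.length - 1 - n) (20001 : Int) := by
  induction n with
  | zero =>
    obtain ⟨m, hm⟩ : ∃ m, cs.length = m + 1 := ⟨cs.length - 1, by omega⟩
    rw [List.range'_zero, List.foldl_nil, hm]
    simp [build, List.replicate_succ]
  | succ n ih =>
    rw [List.range'_1_concat, List.foldl_append, ih (by omega), List.foldl_cons, List.foldl_nil]
    have h1 : (1 : Nat) + n = n + 1 := by omega
    have hk : 1 ≤ cs.length - 1 - n := by omega
    rw [h1, show build cs n = build cs ((n + 1) - 1) from rfl,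
      innerA_eq cs (n + 1) (by omega) _ hk,
      show cs.length - 1 - n - 1 = cs.length - 1 - (n + 1) from by omega]

def BInv (cs : List Char) (n : Nat) (st : Int × Int × PySem.Dict Char Int) : Prop :=
  st.1 = fv cs n ∧ st.2.1 = bmin cs n ∧ ∀ c, st.2.2.get? c = cmin cs c n

theorem lemB (cs : List Char) (n : Nat) :
    BInv cs n ((List.range' 1 n).foldl (solveStepB cs)
      (2, 2, PySem.Dict.insert PySem.Dict.empty (cs.getD 0 ' ') 2)) := by
  induction n with
  | zero =>
    refine ⟨rfl, rfl, fun c => ?_⟩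
    rw [show (List.range' 1 0) = ([] : List Nat) from rfl, List.foldl_nil]
    show (PySem.Dict.insert PySem.Dict.empty (cs.getD 0 ' ') 2).get? c = cmin cs c 0
    rw [PySem.Dict.get?_insert, PySem.Dict.get?_empty]
    simp only [cmin]
    by_cases hc : cs.getD 0 ' ' = c
    · rw [if_pos hc, if_pos hc.symm]
    · rw [if_neg hc, if_neg (fun h => hc h.symm)]
  | succ n ih =>
    rw [List.range'_1_concat, List.foldl_append, List.foldl_cons, List.foldl_nil,
      show (1 : Nat) + n = n + 1 from by omega]
    set st := (List.range' 1 n).foldl (solveStepB cs)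
      (2, 2, PySem.Dict.insert PySem.Dict.empty (cs.getD 0 ' ') 2) with hst
    obtain ⟨h1, h2, h3⟩ := ih
    simp only [solveStepB]
    rw [h2, h3]
    have hEv : (match cmin cs (cs.getD (n + 1) ' ') n with
        | some v => min (bmin cs n + 2) (v + 1)
        | none => bmin cs n + 2) = Ev cs (cs.getD (n + 1) ' ') n := by
      cases hv : cmin cs (cs.getD (n + 1) ' ') n <;> rw [Ev, hv]
    rw [hEv]
    have hcur : min (Ev cs (cs.getD (n + 1) ' ') n + 2 * ((n + 1 : Nat) : Int) - 2) 20001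
        = fv cs (n + 1) := by
      rw [fv_succ]
      push_cast
      omega
    rw [hcur]
    have hd : fv cs (n + 1) - 2 * ((n + 1 : Nat) : Int) = dv cs (n + 1) := by
      rw [dv]
    rw [hd]
    refine ⟨rfl, rfl, fun c' => ?_⟩
    dsimp only
    have hcm1 : cmin cs c' (n + 1) = if cs.getD (n + 1) ' ' = c' then
          (match cmin cs c' n with
            | none => some (dv cs (n + 1))
            | some v => some (if dv cs (n + 1) < v then dv cs (n + 1) else v))
        else cmin cs c' n := rfl
    by_cases hcc : c' = cs.getD (n + 1) ' '
    · subst hcc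
      rw [hcm1, if_pos rfl]
      cases hv : cmin cs (cs.getD (n + 1) ' ') n with
      | none =>
        rw [PySem.Dict.get?_insert, if_pos rfl]
      | some v =>
        dsimp only
        split
        next hlt => rw [PySem.Dict.get?_insert, if_pos rfl]
        next _hlt => rw [h3, hv]

    · rw [hcm1, if_neg (fun h => hcc h.symm)]
      cases hv : cmin cs (cs.getD (n + 1) ' ') n with
      | none =>
        rw [PySem.Dict.get?_insert, if_neg hcc, h3]
      | some v =>
        dsimp only
        split
        next => rw [PySem.Dict.get?_insert, if_neg hcc, h3]
        next => rw [h3]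

-- ===== VERDICT (by name: the statement is the Claim_ definition above) =====
theorem solve_spec : Claim_equal_solve := by
  intro S _ hpre
  have hL : 1 ≤ S.toList.length := List.length_pos_of_ne_nil hpre
  show solve S = solve_alt S
  simp only [solve, solve_alt]
  rw [lemA S.toList (S.toList.length - 1) (by omega),
    show S.toList.length - 1 - (S.toList.length - 1) = 0 from by omega,
    List.replicate_zero, List.append_nil, (lemB S.toList (S.toList.length - 1)).1]
  rfl
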